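-- pv_equiv track=rewrite | github.com/madboy/advent_2019 | src/four.py | solve_part1_and_part2
-- ===== SOURCE A (Python) =====
-- def criteria(number):
--     n = list(str(number))
--     if len(n) == len(set(n)):
--         return False, False
--     if n == sorted(n):
--         return True, criteria2(n)
--     return False, False
--
-- def count(l, x):
--     return l.count(x)
--
-- def criteria2(n):
--     # assumes we have checked critera first
--     match2 = (count(n, x) == 2 for x in n)
--     return any(match2)
--
-- def solve_part1_and_part2(low, high):
--     part1_count = 0
--     part2_count = 0
--     for number in range(low, high):
--         pass1, pass2 = criteria(number)
--         if pass1: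
--             part1_count += 1
--         if pass2:
--             part2_count += 1
--     return part1_count, part2_count
-- ===== SOURCE B (Python) =====
-- def solve_part1_and_part2(low, high):
--     # Single pass over the digit string per number: run-length scan instead of
--     # set/sorted/count (A builds a set, a sorted copy and counts each digit).
--     part1_count = 0
--     part2_count = 0
--     for number in range(low, high):
--         s = str(number)
--         ok = True
--         has_pair = False
--         has_exact2 = False
--         run = 1
--         for i in range(1, len(s)):
--             if s[i] < s[i - 1]:
--                 ok = False
--                 break
--             if s[i] == s[i - 1]:
--                 run += 1
--             else:
--                 if run >= 2:
--                     has_pair = True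
--                 if run == 2:
--                     has_exact2 = True
--                 run = 1
--         if ok:
--             if run >= 2:
--                 has_pair = True
--             if run == 2:
--                 has_exact2 = True
--             if has_pair:
--                 part1_count += 1
--             if has_exact2:
--                 part2_count += 1
--     return part1_count, part2_count
-- ===== Notes on version B (the rewrite author's own statement) =====
-- stated objective: faster
-- what changed: Per number, A builds a set, a sorted copy and counts every digit with list.count (O(d^2) per number); B does one left-to-right run-length scan of the digit string, checking monotonicity and run lengths in a single pass.
import Mathlib
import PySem

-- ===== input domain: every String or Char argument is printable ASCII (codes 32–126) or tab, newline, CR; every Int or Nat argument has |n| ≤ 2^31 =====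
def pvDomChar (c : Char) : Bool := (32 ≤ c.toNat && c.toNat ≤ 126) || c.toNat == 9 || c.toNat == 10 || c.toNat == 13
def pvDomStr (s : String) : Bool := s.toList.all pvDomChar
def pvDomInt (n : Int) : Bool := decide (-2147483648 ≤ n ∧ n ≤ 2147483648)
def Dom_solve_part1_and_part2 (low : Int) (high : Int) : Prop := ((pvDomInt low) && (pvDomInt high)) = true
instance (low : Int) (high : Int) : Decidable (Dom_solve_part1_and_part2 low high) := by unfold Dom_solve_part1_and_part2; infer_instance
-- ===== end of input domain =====

set_option maxRecDepth 4096


-- B replaces A's per-number set/sorted/count checks by one run-length scan of the digit string (faster by a constant factor).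

-- ===== PORT A =====
def pvCountA (l : List Char) (x : Char) : Nat := PySem.List.count l x

def criteria2A (n : List Char) : Bool := n.any (fun x => pvCountA n x == 2)

def criteriaA (number : Int) : Bool × Bool :=
  let n := PySem.Int.toChars number
  if n.length = (PySem.Set.ofList n).length then (false, false)
  else if n = PySem.List.sorted n (fun x => x) false then (true, criteria2A n)
  else (false, false)

def solve_part1_and_part2 (low : Int) (high : Int) : Int × Int :=
  (PySem.List.pyRange low high 1).foldl
    (fun (acc : Int × Int) number =>
      let r := criteriaA number
      let p1 := if r.1 then acc.1 + 1 else acc.1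
      let p2 := if r.2 then acc.2 + 1 else acc.2
      (p1, p2))
    (0, 0)

-- ===== PORT B =====
-- run-length scan: `none` = a descent was found (not monotone); otherwise
-- (has a run of length ≥ 2, has a run of length exactly 2)
def scanRuns (prev : Char) (run : Nat) (hp h2 : Bool) : List Char → Option (Bool × Bool)
  | [] => some (hp || decide (2 ≤ run), h2 || (run == 2))
  | c :: rest =>
      if c < prev then none
      else if c == prev then scanRuns c (run + 1) hp h2 rest
      else scanRuns c 1 (hp || decide (2 ≤ run)) (h2 || (run == 2)) rest

def checkListB (l : List Char) : Bool × Bool :=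
  match l with
  | [] => (false, false)
  | c :: rest =>
    match scanRuns c 1 false false rest with
    | none => (false, false)
    | some r => r

def checkB (number : Int) : Bool × Bool := checkListB (PySem.Int.toChars number)

def solve_part1_and_part2_alt (low : Int) (high : Int) : Int × Int :=
  (PySem.List.pyRange low high 1).foldl
    (fun (acc : Int × Int) number =>
      let r := checkB number
      let p1 := if r.1 then acc.1 + 1 else acc.1
      let p2 := if r.2 then acc.2 + 1 else acc.2
      (p1, p2))
    (0, 0)

-- ===== PRECONDITION & SPEC =====
def Spec_solve_part1_and_part2 (low : Int) (high : Int) (out : Int × Int) : Prop := out = solve_part1_and_part2_alt low high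
instance (low : Int) (high : Int) (out : Int × Int) : Decidable (Spec_solve_part1_and_part2 low high out) := by unfold Spec_solve_part1_and_part2; infer_instance

-- ===== CLAIM (what is proved, stated in full; the proofs are below) =====
def Claim_equal_solve_part1_and_part2 : Prop := ∀ (low : Int) (high : Int), Dom_solve_part1_and_part2 low high → Spec_solve_part1_and_part2 low high (solve_part1_and_part2 low high)

-- ===== LEMMAS AND PROOFS =====

-- not monotone → the scan reports a descent
theorem scanRuns_of_not_chain (l : List Char) : ∀ (prev : Char) (run : Nat) (hp h2 : Bool),
    ¬ List.IsChain (· ≤ ·) (prev :: l) → scanRuns prev run hp h2 l = none := by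
  induction l with
  | nil => intro prev run hp h2 h; exact absurd (List.isChain_singleton prev) h
  | cons c rest ih =>
    intro prev run hp h2 h
    by_cases hlt : c < prev
    · simp [scanRuns, hlt]
    · have hle : prev ≤ c := le_of_not_gt hlt
      have hrest : ¬ List.IsChain (· ≤ ·) (c :: rest) := by
        intro hr; exact h (List.isChain_cons_cons.mpr ⟨hle, hr⟩)
      by_cases heq : c = prev
      · simp [scanRuns, heq, ih _ _ _ _ (heq ▸ hrest)]
      · have : (c == prev) = false := by simp [heq]
        simp [scanRuns, hlt, this, ih _ _ _ _ hrest]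

-- monotone → the scan computes "some digit occurs ≥ 2 / exactly 2 times" of the
-- whole list seen so far (replicate run prev ++ l)
theorem scanRuns_of_chain (l : List Char) : ∀ (prev : Char) (run : Nat) (hp h2 : Bool),
    List.IsChain (· ≤ ·) (prev :: l) → 1 ≤ run →
    scanRuns prev run hp h2 l =
      some (hp || decide (∃ x ∈ List.replicate run prev ++ l, 2 ≤ (List.replicate run prev ++ l).count x),
            h2 || decide (∃ x ∈ List.replicate run prev ++ l, (List.replicate run prev ++ l).count x = 2)) := by
  induction l with
  | nil =>
    intro prev run hp h2 _ hrun
    have hmem : ∀ x ∈ List.replicate run prev, x = prev := fun x hx => (List.eq_of_mem_replicate hx)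
    have hprevmem : prev ∈ List.replicate run prev := List.mem_replicate.mpr ⟨by omega, rfl⟩
    have h1 : (∃ x ∈ List.replicate run prev, 2 ≤ (List.replicate run prev).count x) ↔ 2 ≤ run := by
      constructor
      · rintro ⟨x, hx, hc⟩
        rw [hmem x hx, List.count_replicate_self] at hc; exact hc
      · intro h; exact ⟨prev, hprevmem, by rw [List.count_replicate_self]; exact h⟩
    have h2' : (∃ x ∈ List.replicate run prev, (List.replicate run prev).count x = 2) ↔ run = 2 := by
      constructor
      · rintro ⟨x, hx, hc⟩
        rw [hmem x hx, List.count_replicate_self] at hc; exact hc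
      · intro h; exact ⟨prev, hprevmem, by rw [List.count_replicate_self]; exact h⟩
    have hstep : scanRuns prev run hp h2 [] = some (hp || decide (2 ≤ run), h2 || (run == 2)) := rfl
    rw [hstep, List.append_nil]
    have e1 : decide (2 ≤ run) = decide (∃ x ∈ List.replicate run prev, 2 ≤ (List.replicate run prev).count x) :=
      decide_eq_decide.mpr h1.symm
    have e2 : (run == 2) = decide (∃ x ∈ List.replicate run prev, (List.replicate run prev).count x = 2) := by
      apply Bool.eq_iff_iff.mpr
      simp only [beq_iff_eq, decide_eq_true_eq]
      exact h2'.symm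
    rw [e1, e2]
  | cons c rest ih =>
    intro prev run hp h2 hchain hrun
    rcases List.isChain_cons_cons.mp hchain with ⟨hle, hrest⟩
    have hlt : ¬ c < prev := not_lt.mpr hle
    by_cases heq : c = prev
    · rw [scanRuns, if_neg hlt, if_pos (by simp [heq])]
      subst heq
      rw [ih c (run + 1) hp h2 hrest (by omega)]
      have harr : List.replicate (run + 1) c ++ rest = List.replicate run c ++ (c :: rest) := by
        rw [List.replicate_succ']; simp
      rw [harr]
    · have hbeq : ¬ ((c == prev) = true) := by simp [heq]
      have hplt : prev < c := lt_of_le_of_ne hle (fun h => heq h.symm)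
      rw [scanRuns, if_neg hlt, if_neg hbeq]
      rw [ih c 1 (hp || decide (2 ≤ run)) (h2 || (run == 2)) hrest (le_refl 1),
          List.replicate_one, List.singleton_append]
      -- prev does not occur in c :: rest
      have hnotin : prev ∉ (c :: rest) := by
        intro hmem
        have hpw : (c :: rest).Pairwise (· ≤ ·) := List.IsChain.pairwise hrest
        rcases List.mem_cons.mp hmem with h | h
        · exact heq h.symm
        · have := (List.pairwise_cons.mp hpw).1 prev h
          exact absurd hplt (not_lt.mpr this)
      have hcnt : ∀ x ∈ (c :: rest), (List.replicate run prev ++ (c :: rest)).count x = (c :: rest).count x := by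
        intro x hx
        have hxne : x ≠ prev := fun h => hnotin (h ▸ hx)
        rw [List.count_append, List.count_replicate]
        simp [Ne.symm hxne]
      have hcntp : (List.replicate run prev ++ (c :: rest)).count prev = run := by
        simp [List.count_append, List.count_replicate_self, List.count_eq_zero_of_not_mem hnotin]
      have hprevmem : prev ∈ List.replicate run prev ++ (c :: rest) := by
        refine List.mem_append_left _ (List.mem_replicate.mpr ⟨by omega, rfl⟩)
      have hsplit2 : (∃ x ∈ List.replicate run prev ++ (c :: rest), 2 ≤ (List.replicate run prev ++ (c :: rest)).count x)
          ↔ (2 ≤ run ∨ ∃ x ∈ (c :: rest), 2 ≤ (c :: rest).count x) := by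
        constructor
        · rintro ⟨x, hx, hc2⟩
          rcases List.mem_append.mp hx with hx | hx
          · left; rw [List.eq_of_mem_replicate hx, hcntp] at hc2; exact hc2
          · right; exact ⟨x, hx, by rw [← hcnt x hx]; exact hc2⟩
        · rintro (h | ⟨x, hx, hc2⟩)
          · exact ⟨prev, hprevmem, by rw [hcntp]; exact h⟩
          · exact ⟨x, List.mem_append_right _ hx, by rw [hcnt x hx]; exact hc2⟩
      have hsplit3 : (∃ x ∈ List.replicate run prev ++ (c :: rest), (List.replicate run prev ++ (c :: rest)).count x = 2)
          ↔ (run = 2 ∨ ∃ x ∈ (c :: rest), (c :: rest).count x = 2) := by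
        constructor
        · rintro ⟨x, hx, hc2⟩
          rcases List.mem_append.mp hx with hx | hx
          · left; rw [List.eq_of_mem_replicate hx, hcntp] at hc2; exact hc2
          · right; exact ⟨x, hx, by rw [← hcnt x hx]; exact hc2⟩
        · rintro (h | ⟨x, hx, hc2⟩)
          · exact ⟨prev, hprevmem, by rw [hcntp]; exact h⟩
          · exact ⟨x, List.mem_append_right _ hx, by rw [hcnt x hx]; exact hc2⟩
      have e1 : decide (∃ x ∈ List.replicate run prev ++ (c :: rest), 2 ≤ (List.replicate run prev ++ (c :: rest)).count x)
          = (decide (2 ≤ run) || decide (∃ x ∈ (c :: rest), 2 ≤ (c :: rest).count x)) := by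
        rw [decide_eq_decide.mpr hsplit2, Bool.decide_or]
      have e2 : decide (∃ x ∈ List.replicate run prev ++ (c :: rest), (List.replicate run prev ++ (c :: rest)).count x = 2)
          = ((run == 2) || decide (∃ x ∈ (c :: rest), (c :: rest).count x = 2)) := by
        rw [decide_eq_decide.mpr hsplit3, Bool.decide_or,
            show decide (run = 2) = (run == 2) from rfl]
      rw [e1, e2, Bool.or_assoc, Bool.or_assoc]

-- length of set(l) equals length of l iff l has no duplicates
theorem ofList_length_eq_iff (l : List Char) : l.length = (PySem.Set.ofList l).length ↔ l.Nodup := by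
  constructor
  · intro h
    have hnd : (PySem.Set.ofList l).Nodup := PySem.Set.nodup_ofList l
    have hmem : ∀ x, x ∈ PySem.Set.ofList l ↔ x ∈ l := fun x => PySem.Set.mem_ofList l x
    have hfs : (PySem.Set.ofList l).toFinset = l.toFinset := by
      ext x; simp [List.mem_toFinset, hmem]
    have h1 : (PySem.Set.ofList l).toFinset.card = (PySem.Set.ofList l).length :=
      List.toFinset_card_of_nodup hnd
    have h2 : l.toFinset.card = l.length := by rw [hfs] at h1; omega
    rw [List.card_toFinset] at h2
    exact List.dedup_eq_self.mp ((List.dedup_sublist l).eq_of_length h2)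
  · intro h
    rw [PySem.Set.ofList_eq_self_of_nodup l h]

-- duplicates exist iff some element has count ≥ 2
theorem not_nodup_iff_exists_count (l : List Char) :
    ¬ l.Nodup ↔ ∃ x ∈ l, 2 ≤ l.count x := by
  rw [List.nodup_iff_count_le_one]
  constructor
  · intro h
    rw [not_forall] at h
    rcases h with ⟨x, hx⟩
    refine ⟨x, List.count_pos_iff.mp (by omega), by omega⟩
  · rintro ⟨x, _, hx⟩ h
    have := h x; omega

-- the core per-list equality: A's criteria = B's run-length check
theorem criteriaList_eq (l : List Char) :
    (if l.length = (PySem.Set.ofList l).length then (false, false)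
     else if l = PySem.List.sorted l (fun x => x) false then (true, criteria2A l)
     else (false, false)) = checkListB l := by
  by_cases hc : List.IsChain (· ≤ ·) l
  · cases l with
    | nil => simp [checkListB, PySem.Set.ofList]
    | cons c rest =>
      have hscan := scanRuns_of_chain rest c 1 false false hc (le_refl 1)
      simp only [List.replicate_one, List.singleton_append] at hscan
      have hB : checkListB (c :: rest)
          = (decide (∃ x ∈ (c :: rest), 2 ≤ (c :: rest).count x),
             decide (∃ x ∈ (c :: rest), (c :: rest).count x = 2)) := by
        simp [checkListB, hscan]
      rw [hB]
      by_cases hnd : (c :: rest).Nodup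
      · rw [if_pos ((ofList_length_eq_iff _).mpr hnd)]
        have h1 : ¬ ∃ x ∈ (c :: rest), 2 ≤ (c :: rest).count x :=
          fun h => (not_nodup_iff_exists_count _).mpr h hnd
        have h2 : ¬ ∃ x ∈ (c :: rest), (c :: rest).count x = 2 := by
          rintro ⟨x, hx, h⟩; exact h1 ⟨x, hx, by omega⟩
        have e1 : decide (∃ x ∈ (c :: rest), 2 ≤ (c :: rest).count x) = false := by
          simpa using h1
        have e2 : decide (∃ x ∈ (c :: rest), (c :: rest).count x = 2) = false := by
          simpa using h2
        rw [e1, e2]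
      · rw [if_neg (fun h => hnd ((ofList_length_eq_iff _).mp h))]
        have hpw : List.Pairwise (· ≤ ·) (c :: rest) := List.IsChain.pairwise hc
        have hsorted : (c :: rest) = PySem.List.sorted (c :: rest) (fun x => x) false :=
          (PySem.List.sorted_eq_self_of_pairwise (c :: rest) (fun x => x) (by simpa using hpw)).symm
        rw [if_pos hsorted]
        have h1 : decide (∃ x ∈ (c :: rest), 2 ≤ (c :: rest).count x) = true := by
          simp only [decide_eq_true_iff]
          exact (not_nodup_iff_exists_count _).mp hnd
        have h2 : criteria2A (c :: rest) = decide (∃ x ∈ (c :: rest), (c :: rest).count x = 2) := by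
          apply Bool.eq_iff_iff.mpr
          simp [criteria2A, pvCountA, List.any_eq_true, PySem.List.count_eq]
        rw [h1, h2]
  · have hne : l ≠ PySem.List.sorted l (fun x => x) false := by
      intro h
      apply hc
      have hp := PySem.List.sorted_pairwise l (fun x => x)
      rw [← h] at hp
      exact List.Pairwise.isChain (by simpa using hp)
    cases l with
    | nil => exact absurd List.isChain_nil hc
    | cons c rest =>
      have hscan := scanRuns_of_not_chain rest c 1 false false hc
      simp only [checkListB, hscan]
      rw [if_neg hne]
      split <;> rfl

theorem criteria_eq (number : Int) : criteriaA number = checkB number := by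
  unfold criteriaA checkB
  exact criteriaList_eq (PySem.Int.toChars number)

-- ===== VERDICT (by name: the statement is the Claim_ definition above) =====
theorem solve_part1_and_part2_spec : Claim_equal_solve_part1_and_part2 := by
  intro low high _
  unfold Spec_solve_part1_and_part2 solve_part1_and_part2 solve_part1_and_part2_alt
  congr 1
  funext acc number
  rw [criteria_eq]
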